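-- pv_equiv track=rewrite | github.com/yangelis/AdventOfCode | 2019/day04/aoc42.py | pswd
-- ===== SOURCE A (Python) =====
-- def decr(dig):
--     return any([dig[i] > dig[i+1] for i in range(len(dig)-1)])
--
-- def duo(dig):
--     return any([(i == 0 or dig[i] != dig[i-1]) and dig[i] == dig[i+1] and (i == len(dig)-2 or dig[i] != dig[i+2]) for i in range(len(dig) - 1)])
--
-- def pswd(rg):
--     ans = 0
--     for i in range(rg[0], rg[1]+1):
--         digits = [int(x) for x in str(i)]
--         has_pair = duo(digits)
--         has_dec = decr(digits)
--         if has_pair and not has_dec: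
--             ans += 1
--     return ans
-- ===== SOURCE B (Python) =====
-- def _ok(i):
--     d = [int(x) for x in str(i)]
--     nondec = all(a <= b for a, b in zip(d, d[1:]))
--     return nondec and 2 in [d.count(x) for x in d]
--
-- def pswd(rg):
--     return sum(1 for i in range(rg[0], rg[1] + 1) if _ok(i))
-- ===== Notes on version B (the rewrite author's own statement) =====
-- stated objective: alternative
-- what changed: A's two index-comprehension scans (adjacent decrease test and the triple-neighbour exact-pair test) are replaced by a zip-based non-decreasing check plus a digit-occurrence-count check (some digit occurs exactly twice, which on non-decreasing digits is exactly a maximal run of length two), with the filtered range summed instead of an accumulator loop.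
import Mathlib
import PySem

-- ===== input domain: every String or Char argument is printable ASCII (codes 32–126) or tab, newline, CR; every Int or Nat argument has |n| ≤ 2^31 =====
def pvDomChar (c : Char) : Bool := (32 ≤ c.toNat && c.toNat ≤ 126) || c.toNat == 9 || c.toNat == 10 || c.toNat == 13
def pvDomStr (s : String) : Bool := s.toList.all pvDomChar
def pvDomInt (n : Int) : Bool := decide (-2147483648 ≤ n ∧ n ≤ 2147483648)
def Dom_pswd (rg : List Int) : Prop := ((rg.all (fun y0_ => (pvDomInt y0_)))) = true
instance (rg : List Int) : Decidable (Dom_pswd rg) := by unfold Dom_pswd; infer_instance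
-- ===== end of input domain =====

-- B replaces A's index-scanning decrease/exact-pair tests by an adjacent-zip non-decreasing check
-- plus a some-digit-occurs-exactly-twice count check; same loop over the range (objective: alternative).

-- ===== PORT A =====
-- dig[i] : pyGetD (every index whose value matters is in range; negative i-1 at i=0 sits under a
-- short-circuited 'or', where pyGetD's wraparound value is irrelevant, as in Python)
def pvGetA (d : List Int) (i : Int) : Int := PySem.List.pyGetD d i 0

def decrA (dig : List Int) : Bool :=
  ((PySem.List.pyRange 0 ((dig.length : Int) - 1) 1).map
    (fun i => decide (pvGetA dig i > pvGetA dig (i + 1)))).any id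

def duoA (dig : List Int) : Bool :=
  ((PySem.List.pyRange 0 ((dig.length : Int) - 1) 1).map
    (fun i =>
      (decide (i = 0) || decide (pvGetA dig i ≠ pvGetA dig (i - 1))) &&
      decide (pvGetA dig i = pvGetA dig (i + 1)) &&
      (decide (i = (dig.length : Int) - 2) || decide (pvGetA dig i ≠ pvGetA dig (i + 2))))).any id

-- [int(x) for x in str(i)]  (ofChars? is none only for a non-digit char, excluded by Pre_)
def digitsA (i : Int) : List Int :=
  (PySem.Int.toChars i).map (fun x => (PySem.Int.ofChars? [x]).getD 0)

def pswd (rg : List Int) : Int :=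
  (PySem.List.pyRange (pvGetA rg 0) (pvGetA rg 1 + 1) 1).foldl
    (fun ans i =>
      let digits := digitsA i
      let has_pair := duoA digits
      let has_dec := decrA digits
      if has_pair && !has_dec then ans + 1 else ans) 0

-- ===== PORT B =====
def digitsB (i : Int) : List Int :=
  (PySem.Int.toChars i).map (fun x => (PySem.Int.ofChars? [x]).getD 0)

def okB (i : Int) : Bool :=
  let d := digitsB i
  ((d.zip d.tail).all (fun p => decide (p.1 ≤ p.2))) &&
  ((d.map (fun x => (d.count x : Int))).contains 2)

def pswd_alt (rg : List Int) : Int :=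
  (((PySem.List.pyRange (PySem.List.pyGetD rg 0 0) (PySem.List.pyGetD rg 1 0 + 1) 1).filter
      okB).length : Int)

-- ===== PRECONDITION & SPEC =====
-- Pre_ excludes exactly the inputs where Python A raises: fewer than two elements (IndexError when
-- reading the bounds) and a non-empty range starting below zero (ValueError: int of a minus sign).
def Pre_pswd (rg : List Int) : Prop :=
  2 ≤ rg.length ∧ (0 ≤ rg.getD 0 0 ∨ rg.getD 1 0 < rg.getD 0 0)
instance (rg : List Int) : Decidable (Pre_pswd rg) := by unfold Pre_pswd; infer_instance

def pvWitness_pswd : List Int := [10, 35]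

def Spec_pswd (rg : List Int) (out : Int) : Prop := out = pswd_alt rg
instance (rg : List Int) (out : Int) : Decidable (Spec_pswd rg out) := by unfold Spec_pswd; infer_instance

-- ===== CLAIM (what is proved, stated in full; the proofs are below) =====
def Claim_equal_pswd : Prop := ∀ (rg : List Int), Dom_pswd rg → Pre_pswd rg → Spec_pswd rg (pswd rg)

-- ===== LEMMAS AND PROOFS =====

-- the digit list is non-decreasing, stated over indices
def ND (d : List Int) : Prop := ∀ j : Nat, j + 1 < d.length → d.getD j 0 ≤ d.getD (j + 1) 0

-- A's duo condition, stated over Nat indices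
def DUO (d : List Int) : Prop := ∃ n : Nat, n + 1 < d.length ∧
  (n = 0 ∨ d.getD n 0 ≠ d.getD (n - 1) 0) ∧ d.getD n 0 = d.getD (n + 1) 0 ∧
  (n + 2 = d.length ∨ d.getD n 0 ≠ d.getD (n + 2) 0)

lemma pvGetA_nat (d : List Int) (n : Nat) : pvGetA d (n : Int) = d.getD n 0 := by
  simp [pvGetA]

lemma decrA_eq_true_iff (d : List Int) :
    decrA d = true ↔ ∃ j : Nat, j + 1 < d.length ∧ d.getD (j + 1) 0 < d.getD j 0 := by
  unfold decrA
  rw [List.any_map, List.any_eq_true]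
  constructor
  · rintro ⟨i, hi, hp⟩
    rw [PySem.List.mem_pyRange_one] at hi
    obtain ⟨h0, hlt⟩ := hi
    refine ⟨i.toNat, by omega, ?_⟩
    simp only [Function.comp, id_eq, decide_eq_true_eq] at hp
    rw [show i = (i.toNat : Int) by omega, ← Nat.cast_add_one, pvGetA_nat, pvGetA_nat] at hp
    exact hp
  · rintro ⟨j, hj, hlt⟩
    refine ⟨(j : Int), ?_, ?_⟩
    · rw [PySem.List.mem_pyRange_one]; omega
    · simp only [Function.comp, id_eq, decide_eq_true_eq]
      rw [← Nat.cast_add_one, pvGetA_nat, pvGetA_nat]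
      exact hlt

lemma nondec_iff (d : List Int) :
    ((d.zip d.tail).all (fun p => decide (p.1 ≤ p.2))) = true ↔ ND d := by
  rw [List.all_eq_true]
  constructor
  · intro h j hj
    have hm : (d.getD j 0, d.getD (j+1) 0) ∈ d.zip d.tail := by
      have hlen : j < (d.zip d.tail).length := by
        simp [List.length_zip, List.length_tail]; omega
      have := List.getElem_zip (l := d) (l' := d.tail) (i := j) (h := hlen)
      rw [List.mem_iff_getElem]
      refine ⟨j, hlen, ?_⟩
      rw [this]
      congr 1
      · exact (List.getD_eq_getElem d 0 (by omega)).symm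
      · rw [List.getElem_tail]
        exact (List.getD_eq_getElem d 0 (by omega)).symm
    simpa using h _ hm
  · intro h p hp
    rw [List.mem_iff_getElem] at hp
    obtain ⟨j, hlen, rfl⟩ := hp
    have hj : j + 1 < d.length := by
      simp [List.length_zip, List.length_tail] at hlen; omega
    rw [List.getElem_zip]
    simp only [decide_eq_true_eq]
    have := h j hj
    rw [List.getD_eq_getElem d 0 (by omega), List.getD_eq_getElem d 0 (by omega)] at this
    simpa [List.getElem_tail] using this

lemma decrA_false_iff (d : List Int) : decrA d = false ↔ ND d := by
  constructor
  · intro h j hj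
    by_contra hc
    have : decrA d = true := (decrA_eq_true_iff d).mpr ⟨j, hj, by omega⟩
    simp [h] at this
  · intro hnd
    by_contra h
    have : decrA d = true := by
      cases hde : decrA d
      · exact absurd hde h
      · rfl
    obtain ⟨j, hj, hlt⟩ := (decrA_eq_true_iff d).mp this
    have := hnd j hj
    omega

lemma duoA_eq_true_iff (d : List Int) : duoA d = true ↔ DUO d := by
  unfold duoA DUO
  rw [List.any_map, List.any_eq_true]
  constructor
  · rintro ⟨i, hi, hp⟩
    rw [PySem.List.mem_pyRange_one] at hi
    obtain ⟨h0, hlt⟩ := hi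
    simp only [Function.comp, id_eq, Bool.and_eq_true, Bool.or_eq_true, decide_eq_true_eq] at hp
    obtain ⟨⟨h1, h2⟩, h3⟩ := hp
    rw [show i = ((i.toNat : Nat) : Int) by omega] at h1 h2 h3 hlt
    set n := i.toNat with hn
    refine ⟨n, by omega, ?_, ?_, ?_⟩
    · by_cases hz : n = 0
      · exact Or.inl hz
      · rcases h1 with h1 | h1
        · exact absurd h1 (by omega)
        · right
          rw [show ((n : Int) - 1) = ((n - 1 : Nat) : Int) by omega, pvGetA_nat, pvGetA_nat] at h1
          exact h1
    · rw [← Nat.cast_add_one, pvGetA_nat, pvGetA_nat] at h2; exact h2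
    · rcases h3 with h3 | h3
      · left; omega
      · right
        rw [show ((n : Int) + 2) = ((n + 2 : Nat) : Int) by omega, pvGetA_nat, pvGetA_nat] at h3
        exact h3
  · rintro ⟨n, hlen, h1, h2, h3⟩
    refine ⟨(n : Int), ?_, ?_⟩
    · rw [PySem.List.mem_pyRange_one]; omega
    · simp only [Function.comp, id_eq, Bool.and_eq_true, Bool.or_eq_true, decide_eq_true_eq]
      refine ⟨⟨?_, ?_⟩, ?_⟩
      · by_cases hz : n = 0
        · left; omega
        · rcases h1 with h1 | h1
          · left; omega
          · right
            rw [show ((n : Int) - 1) = ((n - 1 : Nat) : Int) by omega, pvGetA_nat, pvGetA_nat]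
            exact h1
      · rw [← Nat.cast_add_one, pvGetA_nat, pvGetA_nat]; exact h2
      · rcases h3 with h3 | h3
        · left; omega
        · right
          rw [show ((n : Int) + 2) = ((n + 2 : Nat) : Int) by omega, pvGetA_nat, pvGetA_nat]
          exact h3

lemma pair2_iff (d : List Int) :
    ((d.map (fun x => (d.count x : Int))).contains 2) = true ↔ ∃ x ∈ d, d.count x = 2 := by
  rw [List.contains_iff_exists_mem_beq]
  constructor
  · rintro ⟨y, hy, hb⟩
    rw [List.mem_map] at hy
    obtain ⟨x, hx, rfl⟩ := hy
    refine ⟨x, hx, ?_⟩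
    rw [beq_iff_eq] at hb
    omega
  · rintro ⟨x, hx, hc⟩
    exact ⟨(d.count x : Int), List.mem_map.mpr ⟨x, hx, rfl⟩, by simp [hc]⟩

-- index list of the occurrences of x in d
def occ (d : List Int) (x : Int) : List Nat :=
  (List.range d.length).filter (fun j => d.getD j 0 == x)

lemma mem_occ (d : List Int) (x : Int) (j : Nat) :
    j ∈ occ d x ↔ j < d.length ∧ d.getD j 0 = x := by
  simp [occ, List.mem_filter, List.mem_range]

lemma count_eq_occ_length (d : List Int) (x : Int) : d.count x = (occ d x).length := by
  unfold occ
  induction d using List.reverseRecOn with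
  | nil => simp
  | append_singleton l a ih =>
      rw [List.count_append, List.length_append, List.length_singleton, List.range_succ,
        List.filter_append]
      simp only [List.count_singleton, List.length_append, List.filter_cons, List.filter_nil]
      rw [List.getD_append_right l [a] 0 l.length (by omega)]
      have hcongr : (List.range l.length).filter (fun j => (l ++ [a]).getD j 0 == x)
          = (List.range l.length).filter (fun j => l.getD j 0 == x) := by
        apply List.filter_congr
        intro j hj
        rw [List.mem_range] at hj
        rw [List.getD_append l [a] 0 j (by omega)]
      rw [hcongr, ← ih]
      simp only [Nat.sub_self, List.getD_cons_zero]
      by_cases h : a = x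
      · simp [h]
      · simp [h, beq_iff_eq]

lemma nd_le (d : List Int) (hnd : ND d) {i j : Nat} (hij : i ≤ j) (hj : j < d.length) :
    d.getD i 0 ≤ d.getD j 0 := by
  induction j with
  | zero => have : i = 0 := by omega
            rw [this]
  | succ m ih =>
      by_cases h : i = m + 1
      · subst h; exact le_refl _
      · exact le_trans (ih (by omega) (by omega)) (hnd m hj)

lemma occ_nodup (d : List Int) (x : Int) : (occ d x).Nodup :=
  (List.nodup_range).filter _

lemma occ_pairwise (d : List Int) (x : Int) : (occ d x).Pairwise (· < ·) :=
  List.Pairwise.sublist List.filter_sublist List.pairwise_lt_range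

lemma core (d : List Int) (hnd : ND d) : DUO d ↔ ∃ x ∈ d, d.count x = 2 := by
  constructor
  · rintro ⟨n, hlen, h1, h2, h3⟩
    set x := d.getD n 0 with hx
    have hxd : x ∈ d := by
      rw [hx, List.getD_eq_getElem d 0 (by omega)]
      exact List.getElem_mem _
    refine ⟨x, hxd, ?_⟩
    rw [count_eq_occ_length]
    have hext : ∀ j, j ∈ occ d x ↔ j ∈ [n, n + 1] := by
      intro j
      rw [mem_occ]
      simp only [List.mem_cons, List.not_mem_nil, or_false]
      constructor
      · rintro ⟨hj, hjx⟩
        by_cases hlt : j < n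
        · exfalso
          have hn0 : n ≠ 0 := by omega
          rcases h1 with h1 | h1
          · exact hn0 h1
          · apply h1
            have a1 : d.getD j 0 ≤ d.getD (n - 1) 0 := nd_le d hnd (by omega) (by omega)
            have a2 : d.getD (n - 1) 0 ≤ d.getD n 0 := nd_le d hnd (by omega) (by omega)
            omega
        · by_cases hgt : n + 1 < j
          · exfalso
            have hne : n + 2 ≠ d.length := by omega
            rcases h3 with h3 | h3
            · exact hne h3
            · apply h3
              have a1 : d.getD (n + 1) 0 ≤ d.getD (n + 2) 0 := nd_le d hnd (by omega) (by omega)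
              have a2 : d.getD (n + 2) 0 ≤ d.getD j 0 := nd_le d hnd (by omega) (by omega)
              omega
          · omega
      · rintro (rfl | rfl)
        · exact ⟨by omega, rfl⟩
        · exact ⟨by omega, h2.symm⟩
    have hperm : (occ d x).Perm [n, n + 1] := by
      rw [List.perm_ext_iff_of_nodup (occ_nodup d x) (by simp)]
      exact hext
    simpa using hperm.length_eq
  · rintro ⟨x, hx, hc⟩
    rw [count_eq_occ_length] at hc
    obtain ⟨i, k, hik⟩ := List.length_eq_two.mp hc
    have hpw := occ_pairwise d x
    rw [hik] at hpw
    have hiltk : i < k := by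
      rcases List.pairwise_cons.mp hpw with ⟨h, _⟩
      exact h k (by simp)
    obtain ⟨hmi1, hmi2⟩ : i < d.length ∧ d.getD i 0 = x := (mem_occ d x i).mp (by rw [hik]; simp)
    obtain ⟨hmk1, hmk2⟩ : k < d.length ∧ d.getD k 0 = x := (mem_occ d x k).mp (by rw [hik]; simp)
    have hknd : k = i + 1 := by
      by_contra hne
      have : i + 1 ∈ occ d x := by
        rw [mem_occ]
        refine ⟨by omega, ?_⟩
        have a1 : d.getD i 0 ≤ d.getD (i + 1) 0 := nd_le d hnd (by omega) (by omega)
        have a2 : d.getD (i + 1) 0 ≤ d.getD k 0 := nd_le d hnd (by omega) (by omega)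
        omega
      rw [hik] at this
      simp only [List.mem_cons, List.not_mem_nil, or_false] at this
      omega
    refine ⟨i, by omega, ?_, ?_, ?_⟩
    · by_cases hz : i = 0
      · exact Or.inl hz
      · right
        intro heq
        have : i - 1 ∈ occ d x := by
          rw [mem_occ]
          exact ⟨by omega, by omega⟩
        rw [hik] at this
        simp only [List.mem_cons, List.not_mem_nil, or_false] at this
        omega
    · rw [← hknd]; omega
    · by_cases hz : i + 2 = d.length
      · exact Or.inl hz
      · right
        intro heq
        have : i + 2 ∈ occ d x := by
          rw [mem_occ]
          exact ⟨by omega, by omega⟩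
        rw [hik] at this
        simp only [List.mem_cons, List.not_mem_nil, or_false] at this
        omega

lemma ok_eq (i : Int) : (duoA (digitsA i) && !decrA (digitsA i)) = okB i := by
  have hok : okB i = ((((digitsA i).zip (digitsA i).tail).all (fun p => decide (p.1 ≤ p.2))) &&
      (((digitsA i).map (fun x => (((digitsA i).count x : Nat) : Int))).contains 2)) := rfl
  rw [hok]
  set d := digitsA i with hd
  by_cases hnd : ND d
  · rw [(decrA_false_iff d).mpr hnd, (nondec_iff d).mpr hnd]
    simp only [Bool.not_false, Bool.and_true, Bool.true_and]
    rcases hduo : duoA d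
    · rcases hp : ((d.map (fun x => (d.count x : Int))).contains 2)
      · rfl
      · exfalso
        have := ((core d hnd).mpr ((pair2_iff d).mp hp))
        rw [(duoA_eq_true_iff d).mpr this] at hduo
        simp at hduo
    · exact ((pair2_iff d).mpr ((core d hnd).mp ((duoA_eq_true_iff d).mp hduo))).symm
  · have hdec : decrA d = true := by
      rcases h : decrA d
      · exact absurd ((decrA_false_iff d).mp h) hnd
      · rfl
    have hzip : ((d.zip d.tail).all (fun p => decide (p.1 ≤ p.2))) = false := by
      rcases h : ((d.zip d.tail).all (fun p => decide (p.1 ≤ p.2)))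
      · rfl
      · exact absurd ((nondec_iff d).mp h) hnd
    rw [hdec, hzip]
    simp

-- ===== VERDICT (by name: the statement is the Claim_ definition above) =====
theorem pswd_spec : Claim_equal_pswd := by
  intro rg _ _
  unfold Spec_pswd pswd pswd_alt pvGetA
  have hfun : (fun (ans : Int) i =>
      let digits := digitsA i
      let has_pair := duoA digits
      let has_dec := decrA digits
      if has_pair && !has_dec then ans + 1 else ans)
      = (fun (ans : Int) i => if okB i then ans + 1 else ans) := by
    funext ans i
    simp only
    rw [ok_eq]
  rw [hfun, PySem.List.foldl_if_add_one, ← List.countP_eq_length_filter]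
  omega
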